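-- pv_equiv track=rewrite | github.com/PietPjotr/advent-of-code | 2016/day_14/14.py | in_next
-- ===== SOURCE A (Python) =====
-- def in_next(hashes, start, end, char):
--     for h in range(start, end):
--         result = hashes[h]
--         for i in range(len(result) - 4):
--             window = result[i:i+5]
--             if all([el == char for el in window]):
--                 return True
--     return False
-- ===== SOURCE B (Python) =====
-- def in_next(hashes, start, end, char):
--     # Stateful consecutive-run counting instead of overlapping 5-char windows.
--     for h in range(start, end):
--         run = 0
--         for c in hashes[h]:
--             if c == char:
--                 run += 1
--                 if run == 5:
--                     return True
--             else:
--                 run = 0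
--     return False
-- ===== Notes on version B (the rewrite author's own statement) =====
-- stated objective: alternative
-- what changed: Replaces A's overlapping 5-char window check (re-scanning each window with all() and building a list per window) by a single pass per hash maintaining a consecutive-run counter that triggers at 5.
-- outside the precondition, e.g. on in_next(['aaaaa'], 0, 3, 'a'): A returns True, B returns True
import Mathlib
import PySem

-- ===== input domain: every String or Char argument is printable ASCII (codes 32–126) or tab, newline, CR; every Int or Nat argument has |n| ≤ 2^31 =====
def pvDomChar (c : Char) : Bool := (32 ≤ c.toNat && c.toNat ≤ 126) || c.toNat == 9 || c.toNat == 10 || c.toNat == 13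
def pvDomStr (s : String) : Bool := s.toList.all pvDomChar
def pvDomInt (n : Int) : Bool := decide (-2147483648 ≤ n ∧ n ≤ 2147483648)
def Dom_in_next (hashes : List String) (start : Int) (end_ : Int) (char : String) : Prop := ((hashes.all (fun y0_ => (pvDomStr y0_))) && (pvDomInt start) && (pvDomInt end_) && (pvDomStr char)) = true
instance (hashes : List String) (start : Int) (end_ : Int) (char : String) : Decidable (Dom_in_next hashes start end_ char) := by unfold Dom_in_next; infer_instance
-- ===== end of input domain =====

-- B replaces A's overlapping 5-char-window scan by a one-pass consecutive-run counter per hash (alternative decomposition, same cost).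


-- ===== PORT A =====
-- for h in range(start, end): result = hashes[h]; for i in range(len(result)-4): if all(el == char for el in result[i:i+5]): return True
def in_next (hashes : List String) (start : Int) (end_ : Int) (char : String) : Bool :=
  (PySem.List.pyRange start end_ 1).any (fun h =>
    let result := (PySem.List.pyGetD hashes h "").toList
    (PySem.List.pyRange 0 ((result.length : Int) - 4) 1).any (fun i =>
      (PySem.List.slice result (some i) (some (i + 5))).all (fun el => String.singleton el == char)))

-- ===== PORT B =====
-- one pass over the characters with a run counter; returns true as soon as the run reaches 5
def pvRun5 (char : String) : List Char → Nat → Bool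
  | [], _ => false
  | c :: rest, run =>
    if String.singleton c == char then
      if run + 1 == 5 then true else pvRun5 char rest (run + 1)
    else pvRun5 char rest 0

def in_next_alt (hashes : List String) (start : Int) (end_ : Int) (char : String) : Bool :=
  (PySem.List.pyRange start end_ 1).any (fun h =>
    pvRun5 char (PySem.List.pyGetD hashes h "").toList 0)

-- ===== PRECONDITION & SPEC =====
-- Pre_ requires every index in [start, end_) to be a valid Python index into hashes (A raises IndexError
-- otherwise); this also excludes some inputs where A happens to return True before reaching a bad index
-- (B returns the same value there, see the cite).
def Pre_in_next (hashes : List String) (start : Int) (end_ : Int) (char : String) : Prop :=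
  end_ ≤ start ∨ (-(hashes.length : Int) ≤ start ∧ end_ ≤ (hashes.length : Int))
instance (hashes : List String) (start : Int) (end_ : Int) (char : String) : Decidable (Pre_in_next hashes start end_ char) := by unfold Pre_in_next; infer_instance
def pvWitness_in_next : List String × Int × Int × String := (["aaaaa", "abbbb"], 0, 2, "a")

def Spec_in_next (hashes : List String) (start : Int) (end_ : Int) (char : String) (out : Bool) : Prop := out = in_next_alt hashes start end_ char
instance (hashes : List String) (start : Int) (end_ : Int) (char : String) (out : Bool) : Decidable (Spec_in_next hashes start end_ char out) := by unfold Spec_in_next; infer_instance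

-- ===== CLAIM (what is proved, stated in full; the proofs are below) =====
def Claim_equal_in_next : Prop := ∀ (hashes : List String) (start : Int) (end_ : Int) (char : String), Dom_in_next hashes start end_ char → Pre_in_next hashes start end_ char → Spec_in_next hashes start end_ char (in_next hashes start end_ char)

-- ===== LEMMAS AND PROOFS =====

-- W: the Nat-indexed form of A's inner window loop
def pvW (p : Char → Bool) (cs : List Char) : Bool :=
  (List.range (cs.length - 4)).any (fun i => ((cs.drop i).take 5).all p)

-- A's inner loop equals pvW
theorem pvA_inner_eq (p : Char → Bool) (cs : List Char) :
    (PySem.List.pyRange 0 ((cs.length : Int) - 4) 1).any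
      (fun i => (PySem.List.slice cs (some i) (some (i + 5))).all p) = pvW p cs := by
  rw [PySem.List.pyRange_one]
  have hlen : (((cs.length : Int) - 4) - 0).toNat = cs.length - 4 := by omega
  rw [hlen, List.any_map, pvW]
  refine List.any_congr rfl (fun k => ?_)
  show (PySem.List.slice cs (some ((0 : Int) + (k : Int)))
      (some (((0 : Int) + (k : Int)) + 5))).all p = ((cs.drop k).take 5).all p
  have h5 : ((0 : Int) + (k : Int)) + 5 = ((k + 5 : Nat) : Int) := by push_cast; ring
  rw [h5, zero_add, PySem.List.slice_natCast]
  have : k + 5 - k = 5 := by omega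
  rw [this]

-- window-at-0 absorbs into pvW
theorem pvW_absorb (p : Char → Bool) (cs : List Char) :
    ((decide (5 ≤ cs.length) && (cs.take 5).all p) || pvW p cs) = pvW p cs := by
  by_cases h : (decide (5 ≤ cs.length) && (cs.take 5).all p) = true
  · rw [h, Bool.true_or]
    rcases Bool.and_eq_true .. |>.mp h with ⟨h1, h2⟩
    have hlen : 5 ≤ cs.length := of_decide_eq_true h1
    have : pvW p cs = true := by
      rw [pvW, List.any_eq_true]
      exact ⟨0, List.mem_range.mpr (by omega), by simpa using h2⟩
    rw [this]
  · rw [Bool.eq_false_iff.mpr h, Bool.false_or]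

-- recurrence of pvW on cons
theorem pvW_cons (p : Char → Bool) (c : Char) (rest : List Char) :
    pvW p (c :: rest) =
      ((decide (5 ≤ rest.length + 1) && ((c :: rest).take 5).all p) || pvW p rest) := by
  by_cases h : 4 ≤ rest.length
  · have hlen : (c :: rest).length - 4 = (rest.length - 4) + 1 := by simp; omega
    rw [pvW, hlen, List.range_succ_eq_map, List.any_cons, List.any_map]
    have hd : decide (5 ≤ rest.length + 1) = true := by simp; omega
    rw [hd, Bool.true_and]
    refine congrArg₂ (fun a b => a || b) ?_ ?_
    · simp
    · rw [pvW]
      refine List.any_congr rfl (fun k => ?_)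
      simp [List.drop_succ_cons]
  · have h1 : rest.length + 1 - 4 = 0 := by omega
    have h2 : rest.length - 4 = 0 := by omega
    simp [pvW, h1, h2]
    omega

-- the run counter computes "prefix completes the run, or some window of 5 in cs"
theorem pvRun5_eq (char : String) (cs : List Char) :
    ∀ run : Nat, run < 5 →
      pvRun5 char cs run =
        ((decide (5 - run ≤ cs.length) && (cs.take (5 - run)).all (fun el => String.singleton el == char)) ||
          pvW (fun el => String.singleton el == char) cs) := by
  induction cs with
  | nil =>
    intro run hrun
    simp [pvRun5, pvW]
    omega
  | cons c rest ih =>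
    intro run hrun
    set p : Char → Bool := fun el => String.singleton el == char with hp
    have htake : (c :: rest).take (5 - run) = c :: rest.take (4 - run) := by
      have : 5 - run = (4 - run) + 1 := by omega
      rw [this, List.take_succ_cons]
    have hd : decide (5 - run ≤ (c :: rest).length) = decide (5 - (run + 1) ≤ rest.length) := by
      refine decide_eq_decide.mpr ?_
      simp only [List.length_cons]
      omega
    by_cases hc : p c = true
    · by_cases h4 : run = 4
      · subst h4
        have h1 : pvRun5 char (c :: rest) 4 = true := by
          simp [pvRun5, hp ▸ hc]
        rw [h1, htake]
        simp [hc]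
      · have hrun' : run + 1 < 5 := by omega
        have hstep : pvRun5 char (c :: rest) run = pvRun5 char rest (run + 1) := by
          simp [pvRun5, hp ▸ hc]
          omega
        have h45 : 4 - run = 5 - (run + 1) := by omega
        rw [hstep, ih (run + 1) hrun', pvW_cons, htake, hd, List.all_cons, hc, Bool.true_and, h45]
        by_cases hw : (decide (5 ≤ rest.length + 1) && ((c :: rest).take 5).all p) = true
        · rcases Bool.and_eq_true .. |>.mp hw with ⟨hw1, hw2⟩
          have hl : 5 ≤ rest.length + 1 := of_decide_eq_true hw1
          have ht5 : (c :: rest).take 5 = c :: rest.take 4 := rfl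
          rw [ht5, List.all_cons] at hw2
          rcases Bool.and_eq_true .. |>.mp hw2 with ⟨_, hw4⟩
          have hpref : (rest.take (5 - (run + 1))).all p = true := by
            have heq : rest.take (5 - (run + 1)) = (rest.take 4).take (5 - (run + 1)) := by
              rw [List.take_take]
              congr 1
              omega
            rw [heq]
            exact List.all_eq_true.mpr fun x hx => List.all_eq_true.mp hw4 x (List.mem_of_mem_take hx)
          have hX : (decide (5 - (run + 1) ≤ rest.length) && (rest.take (5 - (run + 1))).all p) = true := by
            rw [Bool.and_eq_true, decide_eq_true_iff]
            exact ⟨by omega, hpref⟩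
          rw [hX, hw]
          simp
        · rw [Bool.eq_false_iff.mpr hw, Bool.false_or]
    · have hcf : p c = false := Bool.eq_false_iff.mpr hc
      have hstep : pvRun5 char (c :: rest) run = pvRun5 char rest 0 := by
        simp [pvRun5, hp ▸ hcf]
      rw [hstep, ih 0 (by omega), pvW_cons, hd, htake]
      have hX : (decide (5 - (run + 1) ≤ rest.length) && ((c :: rest.take (4 - run)).all p)) = false := by
        simp [hcf]
      have hw0 : (decide (5 ≤ rest.length + 1) && ((c :: rest).take 5).all p) = false := by
        have ht5 : (c :: rest).take 5 = c :: rest.take 4 := rfl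
        rw [ht5]
        simp [hcf]
      rw [hX, hw0, Bool.false_or, Bool.false_or]
      have := pvW_absorb p rest
      simpa using this

-- per-string equality of the two inner computations
theorem pv_inner_eq (char : String) (cs : List Char) :
    (PySem.List.pyRange 0 ((cs.length : Int) - 4) 1).any
      (fun i => (PySem.List.slice cs (some i) (some (i + 5))).all (fun el => String.singleton el == char)) =
      pvRun5 char cs 0 := by
  rw [pvA_inner_eq, pvRun5_eq char cs 0 (by omega)]
  exact (pvW_absorb _ cs).symm

-- ===== VERDICT (by name: the statement is the Claim_ definition above) =====
theorem in_next_spec : Claim_equal_in_next := by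
  intro hashes start end_ char _ _
  unfold Spec_in_next in_next in_next_alt
  exact List.any_congr rfl (fun h => pv_inner_eq char (PySem.List.pyGetD hashes h "").toList)
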